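-- pv_equiv track=rewrite | github.com/sahiltgi/Python_Practice | Codeforces/main/helpfulmaths.py | maths
-- ===== SOURCE A (Python) =====
-- def maths(string):
--     # lst = list(map(str,string))
--     # for i in range(0,len(lst)-1):
--     #     if ( == "+"):
--     #         lst.remove(lst[i])
--     # return lst
--     if len(string) <= 100:
--         new = ""
--         for i in range(0,len(string)):
--             if string[i] != "+":
--                 new = new + string[i]
--         newLST = list(map(int,new))
--         newLST.sort()
--         final = ""
--         for i in range(0,len(newLST)):
--             final += str(newLST[i])
--             final += "+"
--         return final[0:len(final)-1]
--     else:
--         return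
-- ===== SOURCE B (Python) =====
-- def maths(string):
--     if len(string) > 100:
--         return None
--     counts = [0] * 10
--     for c in string:
--         if c != '+':
--             counts[int(c)] += 1
--     return "+".join(str(d) for d in range(10) for _ in range(counts[d]))
-- ===== Notes on version B (the rewrite author's own statement) =====
-- stated objective: alternative
-- what changed: B replaces A's filter-then-map-int-then-sort-then-rebuild pipeline with a single counting-sort pass over the characters into a 10-slot counts array, emitting the result with one plus-separated join over the expanded counts.
import Mathlib
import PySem

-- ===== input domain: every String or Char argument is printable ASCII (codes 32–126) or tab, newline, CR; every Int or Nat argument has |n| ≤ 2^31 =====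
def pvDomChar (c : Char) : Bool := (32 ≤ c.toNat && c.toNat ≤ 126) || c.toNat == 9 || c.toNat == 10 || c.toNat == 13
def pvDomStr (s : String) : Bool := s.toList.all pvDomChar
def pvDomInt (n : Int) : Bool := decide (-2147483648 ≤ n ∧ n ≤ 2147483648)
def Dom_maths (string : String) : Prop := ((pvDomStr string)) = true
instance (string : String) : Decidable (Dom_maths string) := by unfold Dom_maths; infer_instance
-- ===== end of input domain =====

-- B replaces A's filter/int-map/sort/rebuild pipeline by a one-pass counting sort into 10 buckets plus a '+'-join; equivalence is proved on inputs where A returns.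

-- ===== PORT A =====
def maths (string : String) : Option String :=
  let cs := string.toList
  if cs.length ≤ 100 then
    let new : List Char := cs.foldl (fun acc c => if c != '+' then acc ++ [c] else acc) []
    match new.mapM (fun c => PySem.Int.ofChars? [c]) with
    | none => none   -- int(c) raises ValueError here (excluded by Pre_maths)
    | some newLST =>
      let sortedL := PySem.List.sorted newLST (fun x => x) false
      let final : List Char := sortedL.foldl (fun acc n => acc ++ PySem.Int.toChars n ++ ['+']) []
      some (String.ofList (PySem.List.slice final (some 0) (some ((final.length : Int) - 1))))
  else none

-- ===== PORT B =====
def maths_alt (string : String) : Option String :=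
  let cs := string.toList
  if cs.length > 100 then none
  else
    let st := cs.foldl (fun st c =>
      if c != '+' then
        match st with
        | none => none
        | some counts =>
          match PySem.Int.ofChars? [c] with
          | none => none   -- int(c) raises ValueError here (excluded by Pre_maths)
          | some d => some (counts.set d.toNat (counts.getD d.toNat 0 + 1))
            -- d is int of a single digit char, so 0 ≤ d ≤ 9: .toNat is exact here
      else st) (some (List.replicate 10 (0 : Int)))
    match st with
    | none => none
    | some counts =>
      some (PySem.Str.join "+" ((List.range 10).flatMap
        (fun d => List.replicate ((counts.getD d 0).toNat) (PySem.Int.toStr (Int.ofNat d)))))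

-- ===== PRECONDITION & SPEC =====
-- Pre_ excludes exactly the inputs where A raises ValueError: strings of length ≤ 100
-- containing a character that is neither an ASCII digit nor a plus sign.
def Pre_maths (string : String) : Prop :=
  (decide (100 < string.toList.length)
    || string.toList.all (fun c => PySem.Chars.isdigit c || c == '+')) = true
instance (string : String) : Decidable (Pre_maths string) := by unfold Pre_maths; infer_instance
def pvWitness_maths : String := "3+2+1"

def Spec_maths (string : String) (out : Option String) : Prop := out = maths_alt string
instance (string : String) (out : Option String) : Decidable (Spec_maths string out) := by unfold Spec_maths; infer_instance

-- ===== CLAIM (what is proved, stated in full; the proofs are below) =====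
def Claim_equal_maths : Prop := ∀ (string : String), Dom_maths string → Pre_maths string → Spec_maths string (maths string)

-- ===== LEMMAS AND PROOFS =====

/-- the integer value of a digit character -/
def dval (c : Char) : Int := (c.toNat : Int) - 48

theorem pv_char_eq_of_toNat {c d : Char} (h : c.toNat = d.toNat) : c = d := by
  apply Char.ext
  exact UInt32.toBitVec_inj.mp (BitVec.eq_of_toNat_eq h)

theorem pv_digit_cases {c : Char} (h : PySem.Chars.isdigit c = true) :
    c = '0' ∨ c = '1' ∨ c = '2' ∨ c = '3' ∨ c = '4' ∨ c = '5' ∨ c = '6' ∨ c = '7' ∨ c = '8' ∨ c = '9' := by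
  simp only [PySem.Chars.isdigit, Bool.and_eq_true, decide_eq_true_eq] at h
  obtain ⟨h1, h2⟩ := h
  have h1' : 48 ≤ c.toNat := h1
  have h2' : c.toNat ≤ 57 := h2
  interval_cases h : c.toNat <;>
    [exact Or.inl (pv_char_eq_of_toNat h);
     exact Or.inr (Or.inl (pv_char_eq_of_toNat h));
     exact Or.inr (Or.inr (Or.inl (pv_char_eq_of_toNat h)));
     exact Or.inr (Or.inr (Or.inr (Or.inl (pv_char_eq_of_toNat h))));
     exact Or.inr (Or.inr (Or.inr (Or.inr (Or.inl (pv_char_eq_of_toNat h)))));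
     exact Or.inr (Or.inr (Or.inr (Or.inr (Or.inr (Or.inl (pv_char_eq_of_toNat h))))));
     exact Or.inr (Or.inr (Or.inr (Or.inr (Or.inr (Or.inr (Or.inl (pv_char_eq_of_toNat h)))))));
     exact Or.inr (Or.inr (Or.inr (Or.inr (Or.inr (Or.inr (Or.inr (Or.inl (pv_char_eq_of_toNat h))))))));
     exact Or.inr (Or.inr (Or.inr (Or.inr (Or.inr (Or.inr (Or.inr (Or.inr (Or.inl (pv_char_eq_of_toNat h)))))))));
     exact Or.inr (Or.inr (Or.inr (Or.inr (Or.inr (Or.inr (Or.inr (Or.inr (Or.inr (pv_char_eq_of_toNat h)))))))))]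

theorem pv_digit_ofChars {c : Char} (h : PySem.Chars.isdigit c = true) :
    PySem.Int.ofChars? [c] = some (dval c) := by
  rcases pv_digit_cases h with h|h|h|h|h|h|h|h|h|h <;> subst h <;> decide

theorem pv_dval_bounds {c : Char} (h : PySem.Chars.isdigit c = true) :
    0 ≤ dval c ∧ dval c < 10 := by
  simp only [PySem.Chars.isdigit, Bool.and_eq_true, decide_eq_true_eq] at h
  obtain ⟨h1, h2⟩ := h
  have h1' : 48 ≤ c.toNat := h1
  have h2' : c.toNat ≤ 57 := h2
  unfold dval; omega

theorem pv_mapM_digits (l : List Char) (h : ∀ c ∈ l, PySem.Chars.isdigit c = true) :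
    l.mapM (fun c => PySem.Int.ofChars? [c]) = some (l.map dval) := by
  induction l with
  | nil => rfl
  | cons c t ih =>
    rw [List.mapM_cons, pv_digit_ofChars (h c (by simp)), ih (fun x hx => h x (by simp [hx]))]
    rfl


/-- the per-character counts update of B's loop, on the pure counts list -/
def pvUpd (counts : List Int) (c : Char) : List Int :=
  counts.set (dval c).toNat (counts.getD (dval c).toNat 0 + 1)

/-- the counting-sort expansion: each digit d < n repeated as often as it occurs in ds -/
def pvExp (ds : List Int) (n : Nat) : List Int :=
  (List.range n).flatMap (fun d => List.replicate (ds.count (Int.ofNat d)) (Int.ofNat d))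

theorem pv_slice_dropLast (F : List Char) :
    PySem.List.slice F (some 0) (some ((F.length : Int) - 1)) = F.dropLast := by
  rw [PySem.List.slice_zero_start]
  cases F with
  | nil => simpa using PySem.List.slice_to_neg_one ([] : List Char)
  | cons x t =>
    have h : ((x :: t).length : Int) - 1 = ((t.length : Nat) : Int) := by simp
    rw [h, PySem.List.slice_to_natCast, List.dropLast_eq_take]
    simp

theorem pv_flatMap_join (S : List Int) (h : S ≠ []) :
    S.flatMap (fun n => PySem.Int.toChars n ++ ['+'])
      = PySem.Chars.join ['+'] (S.map PySem.Int.toChars) ++ ['+'] := by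
  induction S with
  | nil => exact absurd rfl h
  | cons x t ih =>
    cases t with
    | nil => simp [PySem.Chars.join_singleton]
    | cons y t2 =>
      rw [List.flatMap_cons, ih (by simp)]
      simp [PySem.Chars.join_cons_cons, List.append_assoc]

theorem pv_flatMap_dropLast (S : List Int) :
    (S.flatMap (fun n => PySem.Int.toChars n ++ ['+'])).dropLast
      = PySem.Chars.join ['+'] (S.map PySem.Int.toChars) := by
  cases hS : S with
  | nil => simp [PySem.Chars.join_nil]
  | cons x t => rw [← hS, pv_flatMap_join S (by simp [hS]), List.dropLast_concat]

theorem pv_fold_some (l : List Char) (h : ∀ c ∈ l, PySem.Chars.isdigit c = true) (acc : List Int) :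
    l.foldl (fun st c =>
      match st with
      | none => none
      | some counts =>
        match PySem.Int.ofChars? [c] with
        | none => none
        | some d => some (counts.set d.toNat (counts.getD d.toNat 0 + 1))) (some acc)
    = some (l.foldl pvUpd acc) := by
  induction l generalizing acc with
  | nil => rfl
  | cons c t ih =>
    have hc := pv_digit_ofChars (h c (by simp))
    simp only [List.foldl_cons, hc]
    exact ih (fun x hx => h x (by simp [hx])) _

theorem pv_getD_set (acc : List Int) (i k : Nat) (hi : i < acc.length) :
    (acc.set i v).getD k 0 = if i = k then v else acc.getD k 0 := by
  simp only [List.getD_eq_getElem?_getD, List.getElem?_set]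
  split
  · simp [hi]
  · rfl

theorem pv_updFold (l : List Char) (h : ∀ c ∈ l, PySem.Chars.isdigit c = true)
    (acc : List Int) (hlen : acc.length = 10) :
    (l.foldl pvUpd acc).length = 10 ∧
      ∀ k : Nat, k < 10 →
        (l.foldl pvUpd acc).getD k 0 = acc.getD k 0 + ((l.map dval).count (k : Int) : Int) := by
  induction l generalizing acc with
  | nil => simp [hlen]
  | cons c t ih =>
    have hd := pv_dval_bounds (h c (by simp))
    have hidx : (dval c).toNat < acc.length := by omega
    have hlen' : (pvUpd acc c).length = 10 := by simp [pvUpd, hlen]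
    obtain ⟨ihl, ihg⟩ := ih (fun x hx => h x (by simp [hx])) (pvUpd acc c) hlen'
    refine ⟨by simpa using ihl, fun k hk => ?_⟩
    rw [List.foldl_cons, ihg k hk]
    have hset := pv_getD_set (v := acc.getD (dval c).toNat 0 + 1) acc (dval c).toNat k hidx
    rw [show pvUpd acc c = acc.set (dval c).toNat (acc.getD (dval c).toNat 0 + 1) from rfl, hset]
    rw [List.map_cons, List.count_cons]
    by_cases he : (dval c).toNat = k
    · have : dval c = (k : Int) := by omega
      simp [he, this]
      omega
    · have : ¬ (dval c = (k : Int)) := by omega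
      simp [he, this]

theorem pv_exp_count (ds : List Int) (n : Nat) (v : Int) :
    (pvExp ds n).count v = if 0 ≤ v ∧ v < (n : Int) then ds.count v else 0 := by
  induction n with
  | zero => simp [pvExp]
  | succ m ih =>
    rw [show pvExp ds (m + 1)
        = pvExp ds m ++ [Int.ofNat m].flatMap (fun d => List.replicate (ds.count d) d) from by
      simp [pvExp, List.range_succ]]
    rw [List.count_append, ih]
    simp only [List.flatMap_cons, List.flatMap_nil, List.append_nil, List.count_replicate,
      Int.ofNat_eq_natCast]
    by_cases hv : ((m : Int) = v)
    · subst hv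
      rw [if_neg (show ¬(0 ≤ (m : Int) ∧ (m : Int) < (m : Int)) by omega), zero_add,
        if_pos (show (((m : Int)) == ((m : Int))) = true by simp),
        if_pos (show (0 : Int) ≤ (m : Int) ∧ (m : Int) < ((m + 1 : Nat) : Int) by push_cast; omega)]
    · rw [if_neg (show ¬(((m : Int)) == v) = true by simpa using hv), add_zero]
      by_cases h3 : 0 ≤ v ∧ v < (m : Int)
      · rw [if_pos h3, if_pos (show 0 ≤ v ∧ v < ((m + 1 : Nat) : Int) by push_cast; omega)]
      · rw [if_neg h3, if_neg (show ¬(0 ≤ v ∧ v < ((m + 1 : Nat) : Int)) by push_cast; omega)]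

theorem pv_exp_mem (ds : List Int) (n : Nat) (v : Int) (h : v ∈ pvExp ds n) :
    0 ≤ v ∧ v < (n : Int) := by
  unfold pvExp at h
  rw [List.mem_flatMap] at h
  obtain ⟨d, hd, hv⟩ := h
  rw [List.mem_range] at hd
  rw [List.eq_of_mem_replicate hv]
  simp only [Int.ofNat_eq_natCast]
  constructor <;> omega

theorem pv_exp_pairwise (ds : List Int) (n : Nat) :
    (pvExp ds n).Pairwise (· ≤ ·) := by
  induction n with
  | zero => simp [pvExp]
  | succ m ih =>
    rw [show pvExp ds (m + 1)
        = pvExp ds m ++ [Int.ofNat m].flatMap (fun d => List.replicate (ds.count d) d) from by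
      simp [pvExp, List.range_succ]]
    rw [List.pairwise_append]
    refine ⟨ih, ?_, ?_⟩
    · simp only [List.flatMap_cons, List.flatMap_nil, List.append_nil]
      exact List.pairwise_replicate.mpr (Or.inr le_rfl)
    · intro a ha b hb
      have hma := pv_exp_mem ds m a ha
      simp only [List.flatMap_cons, List.flatMap_nil, List.append_nil] at hb
      rw [List.eq_of_mem_replicate hb]
      simp only [Int.ofNat_eq_natCast]
      omega

theorem pv_sorted_eq_exp (ds : List Int) (h : ∀ v ∈ ds, 0 ≤ v ∧ v < 10) :
    PySem.List.sorted ds (fun x => x) false = pvExp ds 10 := by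
  apply PySem.List.sorted_id_eq_of_perm_of_pairwise
  · rw [List.perm_iff_count]
    intro v
    rw [pv_exp_count]
    split
    · rfl
    · rename_i hv
      symm
      rw [List.count_eq_zero]
      intro hmem
      exact hv (by have := h v hmem; exact_mod_cast this)
  · exact pv_exp_pairwise ds 10

theorem pv_parts_eq (counts ds : List Int)
    (hc : ∀ k : Nat, k < 10 → counts.getD k 0 = ((ds.count (k : Int) : Nat) : Int)) (n : Nat) (hn : n ≤ 10) :
    ((List.range n).flatMap
        (fun d => List.replicate ((counts.getD d 0).toNat) (PySem.Int.toStr (Int.ofNat d)))).map String.toList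
      = (pvExp ds n).map PySem.Int.toChars := by
  induction n with
  | zero => simp [pvExp]
  | succ m ih =>
    unfold pvExp at *
    rw [List.range_succ, List.flatMap_append, List.flatMap_append, List.map_append,
      ih (by omega)]
    simp only [List.flatMap_cons, List.flatMap_nil, List.append_nil, List.map_replicate]
    rw [hc m (by omega), PySem.Int.toList_toStr]
    simp

-- ===== VERDICT (by name: the statement is the Claim_ definition above) =====
theorem maths_spec : Claim_equal_maths := by
  intro string _ hpre
  simp only [Spec_maths, maths, maths_alt]
  by_cases hlen : string.toList.length ≤ 100
  · have hgt : ¬ (string.toList.length > 100) := by omega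
    rw [if_pos hlen, if_neg hgt]
    have hall : ∀ c ∈ string.toList, PySem.Chars.isdigit c = true ∨ c = '+' := by
      unfold Pre_maths at hpre
      rw [Bool.or_eq_true, decide_eq_true_eq, List.all_eq_true] at hpre
      rcases hpre with h | h
      · exact absurd h (by omega)
      · intro c hc
        simpa using h c hc
    have hdig : ∀ c ∈ string.toList.filter (fun c => c != '+'), PySem.Chars.isdigit c = true := by
      intro c hc
      rw [List.mem_filter] at hc
      rcases hall c hc.1 with h | h
      · exact h
      · exact absurd h (by simpa using hc.2)
    rw [PySem.List.foldl_append_if_eq_filter, List.nil_append]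
    rw [pv_mapM_digits _ hdig]
    rw [PySem.List.foldl_if_eq_foldl_filter (p := fun c => c != '+')]
    rw [pv_fold_some _ hdig]
    set new := List.filter (fun c => c != '+') string.toList with hnew
    set ds := new.map dval with hds
    have hbounds : ∀ v ∈ ds, 0 ≤ v ∧ v < 10 := by
      intro v hv
      rw [hds, List.mem_map] at hv
      obtain ⟨c, hc, rfl⟩ := hv
      exact pv_dval_bounds (hdig c hc)
    obtain ⟨hl10, hcnt⟩ := pv_updFold new hdig (List.replicate 10 0) (by simp)
    have hc : ∀ k : Nat, k < 10 →
        (new.foldl pvUpd (List.replicate 10 0)).getD k 0 = ((ds.count (k : Int) : Nat) : Int) := by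
      intro k hk
      rw [hcnt k hk, List.getD_replicate _ hk, zero_add]
    refine congrArg some ?_
    simp only [List.append_assoc]
    rw [PySem.List.foldl_append_eq_flatMap, List.nil_append, pv_slice_dropLast,
      pv_flatMap_dropLast, pv_sorted_eq_exp ds hbounds]
    have hparts := pv_parts_eq (new.foldl pvUpd (List.replicate 10 0)) ds hc 10 (le_refl 10)
    have hreq : (PySem.Str.join "+"
        ((List.range 10).flatMap
          (fun d => List.replicate (((new.foldl pvUpd (List.replicate 10 0)).getD d 0).toNat)
            (PySem.Int.toStr (Int.ofNat d))))).toList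
        = PySem.Chars.join ['+'] ((pvExp ds 10).map PySem.Int.toChars) := by
      rw [PySem.Str.toList_join, show ("+" : String).toList = ['+'] from rfl, hparts]
    rw [← hreq, String.ofList_toList]
  · rw [if_neg hlen, if_pos (by omega)]
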